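-- pv_equiv track=rewrite | github.com/IceMage144/movies-ontology | imdbAnalyzer.py | st_op
-- ===== SOURCE A (Python) =====
-- def st_op(t):
--     s = t
--     p = s.find("(")
--     count = 0
--     while p < len(s) and p + 1 < len(s) and not s[p+1].isdigit():
--         tlist = list(s)
--         tlist[p] = '_'
--         s = "".join(tlist)
--         p = s.find("(")
--         count += 1
--         if count > 20:
--             return len(t)
--     return p
-- ===== SOURCE B (Python) =====
-- def st_op(t):
--     for i, c in enumerate(t):
--         if c == '(' and (i + 1 == len(t) or t[i + 1].isdigit()):
--             return i
--     return len(t)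
-- ===== Notes on version B (the rewrite author's own statement) =====
-- stated objective: faster
-- what changed: A repeatedly rebuilds the whole string (masking each rejected open paren) and re-runs find from the start; B is a single enumerate pass returning the first open paren that is followed by a digit or ends the string, and len(t) when there is none.
-- intended difference: On strings with no qualifying open paren that are empty or start with a digit A returns -1 (its find sentinel leaks out), and on strings where more than 20 open parens precede the first qualifying one A returns len(t) (its 21-iteration cap); B returns len(t) resp. the index of the first qualifying open paren, the intended cut position. — e.g. on st_op("1"): A returns -1, B returns 1
import Mathlib
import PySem

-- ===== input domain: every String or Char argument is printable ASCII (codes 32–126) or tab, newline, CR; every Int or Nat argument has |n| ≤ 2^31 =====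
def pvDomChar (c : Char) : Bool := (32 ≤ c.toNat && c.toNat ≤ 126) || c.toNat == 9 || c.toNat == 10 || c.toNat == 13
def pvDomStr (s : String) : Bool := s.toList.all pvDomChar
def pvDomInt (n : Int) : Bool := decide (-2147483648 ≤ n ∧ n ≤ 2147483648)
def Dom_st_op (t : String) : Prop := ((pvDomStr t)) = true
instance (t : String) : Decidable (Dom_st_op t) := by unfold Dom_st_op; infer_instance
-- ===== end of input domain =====

-- B is a single left-to-right scan for the first open paren followed by a digit (or ending the string),
-- len(t) if none; measured faster than A's rebuild-and-refind loop; A differs only on the inputs in D_ below.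

-- ===== PORT A =====
-- A's while loop. `count` only counts up from 0, so it is carried as a Nat (same values as Python's int).
-- `tlist = list(s); tlist[p] = '_'; s = "".join(tlist)` is exactly PySem.List.pySetD s p '_' (p is always a
-- valid Python index here: p ≥ 0, or p = -1 with s nonempty, so pySetD's default case never fires).
-- `s[p+1]` is read with PySem.List.pyGetD (the guard p+1 < len(s), p+1 ≥ 0 makes it in range).
def maskA (s : List Char) (p : Int) : List Char := PySem.List.pySetD s p '_'

def stopA (t : List Char) (s : List Char) (p : Int) (count : Nat) : Int :=
  if p < PySem.List.len s ∧ p + 1 < PySem.List.len s ∧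
      ¬ PySem.Chars.isdigit (PySem.List.pyGetD s (p + 1) ' ') = true then
    if _h : count + 1 > 20 then (PySem.List.len t)
    else stopA t (maskA s p) (PySem.Chars.find (maskA s p) ['(']) (count + 1)
  else p
termination_by 21 - count
decreasing_by omega

def st_op (t : String) : Int :=
  let s := t.toList
  stopA s s (PySem.Chars.find s ['(']) 0

-- ===== PORT B =====
-- B's for loop over enumerate(t); `t[i+1]` is only reached when i+1 < len(t), read with PySem.List.pyGetD.
def altGo (l : List Char) : List (Int × Char) → Int
  | [] => PySem.List.len l
  | (i, c) :: rest =>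
      if c = '(' ∧ (i + 1 = PySem.List.len l ∨ PySem.Chars.isdigit (PySem.List.pyGetD l (i + 1) ' ') = true) then i
      else altGo l rest

def st_op_alt (t : String) : Int := altGo t.toList (PySem.List.enumerate t.toList 0)

-- ===== PRECONDITION & SPEC =====
-- one linear scan: paren count at the first qualifying '(' (one followed by a digit or ending the
-- string), none if there is no qualifying '('
def dFirst : List Char → Nat → Option Nat
  | [], _ => none
  | c :: rest, k =>
    if c == '(' then
      if rest.isEmpty || PySem.Chars.isdigit (rest.headD ' ') then some k
      else dFirst rest (k + 1)
    else dFirst rest k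

def dFun (l : List Char) : Bool :=
  match dFirst l 0 with
  | some k => decide (21 ≤ k)
  | none => l.isEmpty || PySem.Chars.isdigit (l.headD ' ')

-- On strings with no qualifying open paren that are empty or start with a digit A returns -1 (its find
-- sentinel leaks out), and on strings where more than 20 open parens precede the first qualifying one A
-- returns len(t) (its 21-iteration cap); B returns len(t) resp. the index of the first qualifying open
-- paren, the intended cut position.
def D_st_op (t : String) : Prop := dFun t.toList = true
instance (t : String) : Decidable (D_st_op t) := by unfold D_st_op; infer_instance

def Spec_st_op (t : String) (out : Int) : Prop := ¬ D_st_op t → out = st_op_alt t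
instance (t : String) (out : Int) : Decidable (Spec_st_op t out) := by unfold Spec_st_op; infer_instance

def pvDiffWitness_st_op : String := "1"
def pvDiffWitnessOut_st_op : Int × Int := (-1, 1)

-- ===== CLAIM (what is proved, stated in full; the proofs are below) =====
def Claim_unchanged_st_op : Prop := ∀ (t : String), Dom_st_op t → Spec_st_op t (st_op t)
def Claim_changed_st_op : Prop := Dom_st_op (pvDiffWitness_st_op) ∧ D_st_op (pvDiffWitness_st_op) ∧ st_op (pvDiffWitness_st_op) = pvDiffWitnessOut_st_op.1 ∧ st_op_alt (pvDiffWitness_st_op) = pvDiffWitnessOut_st_op.2 ∧ pvDiffWitnessOut_st_op.1 ≠ pvDiffWitnessOut_st_op.2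

-- ===== LEMMAS AND PROOFS =====

-- proof-side helper: index i of l holds a qualifying '(' (one followed by a digit or ending the string)
def qualB (l : List Char) (i : Nat) : Bool :=
  (l.getD i ' ' == '(') && (decide (l.length ≤ i + 1) || PySem.Chars.isdigit (l.getD (i + 1) ' '))

-- masking helper used only by the proofs: the character A's loop writes over a '('
def mC (c : Char) : Char := if c = '(' then '_' else c

-- A's string after all '(' in the first d characters have been masked
def maskPre (t : List Char) (d : Nat) : List Char := (t.take d).map mC ++ t.drop d

theorem mC_ne_paren (c : Char) : mC c ≠ '(' := by
  unfold mC; split_ifs with h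
  · decide
  · exact h

theorem mC_eq_self {c : Char} (h : c ≠ '(') : mC c = c := by simp [mC, h]

theorem length_maskPre (t : List Char) (d : Nat) : (maskPre t d).length = t.length := by
  simp [maskPre]; omega

theorem length_maskPre' (t : List Char) (d : Nat) :
    PySem.List.len (maskPre t d) = (t.length : Int) := by
  simp [PySem.List.len_eq, length_maskPre]

theorem singleton_prefix_iff (c : Char) (s : List Char) : [c] <+: s ↔ s.head? = some c := by
  cases s with
  | nil => simp
  | cons a l =>
    constructor
    · rintro ⟨u, hu⟩; simp at hu; simp [hu.1]
    · intro h; simp at h; subst h; exact ⟨l, rfl⟩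

theorem find_no_paren {s : List Char} (h : '(' ∉ s) : PySem.Chars.find s ['('] = -1 := by
  rw [PySem.Chars.find_eq_neg_one_iff, List.singleton_infix_iff]; exact h

theorem find_at_paren (pre suf : List Char) (h : '(' ∉ pre) :
    PySem.Chars.find (pre ++ '(' :: suf) ['('] = pre.length := by
  have hmem : '(' ∈ pre ++ '(' :: suf := by simp
  have h0 : 0 ≤ PySem.Chars.find (pre ++ '(' :: suf) ['('] := by
    rw [PySem.Chars.find_nonneg_iff, List.singleton_infix_iff]; exact hmem
  obtain ⟨hpref, hmin⟩ := PySem.Chars.find_spec h0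
  set f := PySem.Chars.find (pre ++ '(' :: suf) ['('] with hf
  have hle : f.toNat ≤ pre.length := by
    by_contra hgt
    have hp : [('(' : Char)] <+: (pre ++ '(' :: suf).drop pre.length := by
      rw [singleton_prefix_iff, List.head?_drop]
      simp
    exact hmin pre.length (by omega) hp
  have hge : pre.length ≤ f.toNat := by
    by_contra hlt
    rw [singleton_prefix_iff, List.head?_drop] at hpref
    have : (pre ++ '(' :: suf)[f.toNat]? = pre[f.toNat]? := by
      rw [List.getElem?_append_left (by omega)]
    rw [this] at hpref
    exact h (List.mem_of_getElem? hpref)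
  omega

-- the tail phase of A's loop: no '(' left, p = -1
theorem stopA_no_paren (t : List Char) : ∀ (k count : Nat) (s : List Char), 21 - count ≤ k → '(' ∉ s →
    stopA t s (-1) count =
      if s = [] ∨ PySem.Chars.isdigit (PySem.List.pyGetD s 0 ' ') = true then -1 else PySem.List.len t := by
  intro k
  induction k with
  | zero =>
    intro count s hk hs
    have hc : count + 1 > 20 := by omega
    by_cases hemp : s = []
    · subst hemp
      rw [stopA, if_neg (by simp [PySem.List.len_eq])]
      rw [if_pos (Or.inl rfl)]
    · by_cases hdig : PySem.Chars.isdigit (PySem.List.pyGetD s 0 ' ') = true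
      · rw [stopA, if_neg (by
          rintro ⟨-, -, h⟩
          rw [show ((-1 : Int) + 1) = 0 by ring] at h
          exact h hdig)]
        rw [if_pos (Or.inr hdig)]
      · have hlen := List.length_pos_iff.mpr hemp
        rw [stopA, if_pos ⟨by simp [PySem.List.len_eq]; omega,
            by simp [PySem.List.len_eq]; omega,
            by rw [show ((-1 : Int) + 1) = 0 by ring]; exact hdig⟩]
        rw [dif_pos hc, if_neg (by push Not; exact ⟨hemp, hdig⟩)]
  | succ k ih =>
    intro count s hk hs
    by_cases hemp : s = []
    · subst hemp
      rw [stopA, if_neg (by simp [PySem.List.len_eq])]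
      rw [if_pos (Or.inl rfl)]
    · by_cases hdig : PySem.Chars.isdigit (PySem.List.pyGetD s 0 ' ') = true
      · rw [stopA, if_neg (by
          rintro ⟨-, -, h⟩
          rw [show ((-1 : Int) + 1) = 0 by ring] at h
          exact h hdig)]
        rw [if_pos (Or.inr hdig)]
      · have hlen := List.length_pos_iff.mpr hemp
        rw [stopA, if_pos ⟨by simp [PySem.List.len_eq]; omega,
            by simp [PySem.List.len_eq]; omega,
            by rw [show ((-1 : Int) + 1) = 0 by ring]; exact hdig⟩]
        rw [if_neg (by push Not; exact ⟨hemp, hdig⟩)]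
        by_cases hc : count + 1 > 20
        · rw [dif_pos hc]
        · rw [dif_neg hc]
          have hset : maskA s (-1) = s.set (s.length - 1) '_' := by
            simp [maskA, PySem.List.pySetD, PySem.List.pySet?, PySem.List.pyIdx?]
            rw [if_pos (by omega)]
            rfl
          have hnp : '(' ∉ maskA s (-1) := by
            rw [hset]
            intro hmem
            rcases List.mem_or_eq_of_mem_set hmem with h | h
            · exact hs h
            · exact absurd h (by decide)
          rw [find_no_paren hnp, ih (count + 1) _ (by omega) hnp]
          have hne' : maskA s (-1) ≠ [] := by
            rw [hset]; simpa using hemp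
          have hdig' : ¬ PySem.Chars.isdigit (PySem.List.pyGetD (maskA s (-1)) 0 ' ') = true := by
            rw [hset]
            cases s with
            | nil => exact absurd rfl hemp
            | cons c tail =>
              cases tail with
              | nil => simp [PySem.List.pyGetD_zero]; decide
              | cons c2 t2 =>
                simp only [List.length_cons, PySem.List.pyGetD_zero] at *
                rw [show (c :: c2 :: t2).set (t2.length + 1 + 1 - 1) '_' = c :: (c2 :: t2).set (t2.length + 1 - 1) '_' by simp]
                simpa using hdig
          rw [if_neg (by push Not; exact ⟨hne', hdig'⟩)]

-- B's scan skips entries that do not qualify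
theorem altGo_skip (l : List Char) (l1 l2 : List (Int × Char))
    (h : ∀ x ∈ l1, ¬(x.2 = '(' ∧ (x.1 + 1 = PySem.List.len l ∨
        PySem.Chars.isdigit (PySem.List.pyGetD l (x.1 + 1) ' ') = true))) :
    altGo l (l1 ++ l2) = altGo l l2 := by
  induction l1 with
  | nil => rfl
  | cons x l1' ih =>
    obtain ⟨i, c⟩ := x
    simp only [List.cons_append, altGo, if_neg (h (i, c) (by simp))]
    exact ih (fun y hy => h y (by simp [hy]))

-- reading the d-masked string at an index ≥ d reads t
theorem getD_maskPre (t : List Char) {d i : Nat} (hd : d ≤ t.length) (h : d ≤ i) :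
    (maskPre t d).getD i ' ' = t.getD i ' ' := by
  rw [List.getD_eq_getElem?_getD, List.getD_eq_getElem?_getD]
  by_cases hi : i < t.length
  · unfold maskPre
    rw [List.getElem?_append_right (by simp; omega), List.getElem?_drop]
    simp
    rw [show d + (i - min d t.length) = i from by omega]
  · rw [List.getElem?_eq_none (by rw [length_maskPre]; omega), List.getElem?_eq_none (by omega)]

-- masking never changes whether the first character is a digit
theorem headdig_maskPre (t : List Char) (d : Nat) :
    PySem.Chars.isdigit (PySem.List.pyGetD (maskPre t d) 0 ' ') =
      PySem.Chars.isdigit (PySem.List.pyGetD t 0 ' ') := by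
  cases t with
  | nil => simp [maskPre]
  | cons c tail =>
    cases d with
    | zero => simp [maskPre]
    | succ d' =>
      simp only [maskPre, List.take_succ_cons, List.drop_succ_cons, List.map_cons,
        List.cons_append, PySem.List.pyGetD_zero, List.getD_cons_zero]
      unfold mC; split_ifs with h
      · subst h; decide
      · rfl

-- reading t at an in-range index, as a getElem
theorem getD_lt {t : List Char} {i : Nat} (h : i < t.length) : t.getD i ' ' = t[i] := by
  rw [List.getD_eq_getElem?_getD, List.getElem?_eq_getElem h]; rfl

-- counting '(' in a longer prefix counts at least as many
theorem count_take_mono (l : List Char) {a b : Nat} (h : a ≤ b) :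
    (l.take a).count '(' ≤ (l.take b).count '(' := by
  have h2 : l.take a = (l.take b).take a := by rw [List.take_take, Nat.min_eq_left h]
  rw [h2]; exact (List.take_sublist ..).count_le _

-- what dFirst computes, in terms of qualB: none when no index qualifies, otherwise the number of
-- '(' before the first qualifying index
theorem dFirst_spec (t : List Char) : ∀ (m d k : Nat), t.length - d ≤ m → d ≤ t.length →
    k = (t.take d).count '(' → (∀ j, j < d → qualB t j = false) →
    (dFirst (t.drop d) k = none ∧ ∀ i, qualB t i = false) ∨
    (∃ Q0, d ≤ Q0 ∧ Q0 < t.length ∧ qualB t Q0 = true ∧ (∀ j, j < Q0 → qualB t j = false) ∧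
      dFirst (t.drop d) k = some ((t.take Q0).count '(')) := by
  intro m
  induction m with
  | zero =>
    intro d k hm hd hk hq
    have hdrop : t.drop d = [] := List.drop_eq_nil_iff.mpr (by omega)
    left
    refine ⟨by rw [hdrop]; rfl, ?_⟩
    intro i
    by_cases hi : i < d
    · exact hq i hi
    · unfold qualB
      rw [Bool.and_eq_false_iff]
      have hne : t.getD i ' ' ≠ '(' := by
        rw [List.getD_eq_getElem?_getD, List.getElem?_eq_none (by omega)]; decide
      exact Or.inl (by simpa using hne)
  | succ m ih =>
    intro d k hm hd hk hq
    rcases Nat.lt_or_ge d t.length with hdl | hdl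
    · have hcons : t.drop d = t.getD d ' ' :: t.drop (d + 1) := by
        rw [getD_lt hdl]; exact List.drop_eq_getElem_cons hdl
      have hconvE : (t.drop (d + 1)).isEmpty = decide (t.length ≤ d + 1) := by
        by_cases h : t.length ≤ d + 1
        · simp [List.drop_eq_nil_iff.mpr h, h]
        · rcases hdd : t.drop (d + 1) with _ | ⟨a, l⟩
          · rw [List.drop_eq_nil_iff] at hdd; omega
          · simp [h]
      have hconvH : (t.drop (d + 1)).headD ' ' = t.getD (d + 1) ' ' := by
        rw [List.getD_eq_getElem?_getD,
          show t[d + 1]? = (t.drop (d + 1))[0]? from by rw [List.getElem?_drop]]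
        rcases t.drop (d + 1) with _ | ⟨a, l⟩ <;> simp
      have htk : t.take (d + 1) = t.take d ++ [t[d]] := by
        rw [List.take_add_one, List.getElem?_eq_getElem hdl]; rfl
      rw [hcons, dFirst, hconvE, hconvH]
      by_cases hp : (t.getD d ' ' == '(') = true
      · rw [if_pos hp]
        by_cases hqd : (decide (t.length ≤ d + 1) || PySem.Chars.isdigit (t.getD (d + 1) ' ')) = true
        · rw [if_pos hqd]
          right
          refine ⟨d, le_refl d, hdl, ?_, hq, by rw [hk]⟩
          unfold qualB
          rw [Bool.and_eq_true_iff]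
          exact ⟨hp, hqd⟩
        · rw [if_neg hqd]
          have hqdF : qualB t d = false := by
            unfold qualB
            rw [Bool.and_eq_false_iff]
            exact Or.inr (Bool.eq_false_iff.mpr hqd)
          have hpd : t[d] = '(' := by rw [← getD_lt hdl]; exact beq_iff_eq.mp hp
          have hk' : k + 1 = (t.take (d + 1)).count '(' := by
            rw [htk, List.count_append, hpd]
            simp [hk]
          have hq' : ∀ j, j < d + 1 → qualB t j = false := by
            intro j hj
            rcases Nat.lt_or_ge j d with h1 | h1
            · exact hq j h1
            · have : j = d := by omega
              subst this; exact hqdF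
          rcases ih (d + 1) (k + 1) (by omega) (by omega) hk' hq' with ⟨h1, h2⟩ | ⟨Q0, h1, h2, h3, h4, h5⟩
          · exact Or.inl ⟨h1, h2⟩
          · exact Or.inr ⟨Q0, by omega, h2, h3, h4, h5⟩
      · rw [if_neg hp]
        have hqdF : qualB t d = false := by
          unfold qualB
          rw [Bool.and_eq_false_iff]
          exact Or.inl (Bool.eq_false_iff.mpr hp)
        have hpd : t[d] ≠ '(' := by
          intro he
          exact hp (by rw [getD_lt hdl, he]; rfl)
        have hk' : k = (t.take (d + 1)).count '(' := by
          rw [htk, List.count_append, hk]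
          simp [hpd]
        have hq' : ∀ j, j < d + 1 → qualB t j = false := by
          intro j hj
          rcases Nat.lt_or_ge j d with h1 | h1
          · exact hq j h1
          · have : j = d := by omega
            subst this; exact hqdF
        rcases ih (d + 1) k (by omega) (by omega) hk' hq' with ⟨h1, h2⟩ | ⟨Q0, h1, h2, h3, h4, h5⟩
        · exact Or.inl ⟨h1, h2⟩
        · exact Or.inr ⟨Q0, by omega, h2, h3, h4, h5⟩
    · have hdrop : t.drop d = [] := List.drop_eq_nil_iff.mpr (by omega)
      left
      refine ⟨by rw [hdrop]; rfl, ?_⟩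
      intro i
      by_cases hi : i < d
      · exact hq i hi
      · unfold qualB
        rw [Bool.and_eq_false_iff]
        have hne : t.getD i ' ' ≠ '(' := by
          rw [List.getD_eq_getElem?_getD, List.getElem?_eq_none (by omega)]; decide
        exact Or.inl (by simpa using hne)

-- if no index of t qualifies, B's scan condition is false on every enumerate entry
theorem noqual_entries (t : List Char) (d : Nat)
    (hnoq : ∀ i, qualB t i = false) :
    ∀ x ∈ PySem.List.enumerate (t.drop d) (d : Int), ¬(x.2 = '(' ∧ (x.1 + 1 = PySem.List.len t ∨
        PySem.Chars.isdigit (PySem.List.pyGetD t (x.1 + 1) ' ') = true)) := by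
  intro x hx
  rw [PySem.List.mem_enumerate_iff] at hx
  obtain ⟨k, hk, rfl⟩ := hx
  rintro ⟨h1, h2⟩
  have hkl : d + k < t.length := by
    have := hk; simp at this; omega
  have hchar : (t.drop d)[k] = t[d + k]'hkl := List.getElem_drop ..
  have hq := hnoq (d + k)
  unfold qualB at hq
  rw [Bool.and_eq_false_iff] at hq
  rcases hq with h3 | h3
  · rw [beq_eq_false_iff_ne] at h3
    exact h3 (by rw [getD_lt hkl, ← hchar]; exact h1)
  · rw [Bool.or_eq_false_iff, decide_eq_false_iff_not] at h3
    obtain ⟨h4, h5⟩ := h3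
    rcases h2 with h6 | h6
    · rw [PySem.List.len_eq] at h6
      simp only at h6
      omega
    · rw [show ((d : Int) + (k : Int)) + 1 = ((d + k + 1 : Nat) : Int) by push_cast; ring,
        PySem.List.pyGetD_natCast] at h6
      rw [h6] at h5
      simp at h5

-- the case with no '(' at or after position d: A runs its tail phase, B's scan falls through to -1
theorem main_nil (t : List Char) (d count : Nat) (hd : d ≤ t.length)
    (hall : ∀ c ∈ t.drop d, c ≠ '(') (hD : dFun t = false)
    (hq : ∀ i, i < d → qualB t i = false) :
    stopA t (maskPre t d) (PySem.Chars.find (maskPre t d) ['(']) count =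
      altGo t (PySem.List.enumerate (t.drop d) (d : Int)) := by
  have hnp : '(' ∉ maskPre t d := by
    unfold maskPre
    intro hmem
    rcases List.mem_append.mp hmem with h | h
    · obtain ⟨x, -, hx⟩ := List.mem_map.mp h
      exact mC_ne_paren x hx
    · exact hall _ h rfl
  -- no index of t qualifies
  have hqall : ∀ i, qualB t i = false := by
    intro i
    by_cases hi : i < d
    · exact hq i hi
    · unfold qualB
      by_cases hil : i < t.length
      · have hmem : t.getD i ' ' ∈ t.drop d := by
          rw [getD_lt hil, show t[i] = (t.drop d)[i - d]'(by simp; omega) from by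
            rw [List.getElem_drop]; congr 1; omega]
          exact List.getElem_mem _
        have hne : t.getD i ' ' ≠ '(' := hall _ hmem
        rw [Bool.and_eq_false_iff]
        exact Or.inl (by simpa using hne)
      · have hne : t.getD i ' ' ≠ '(' := by
          rw [List.getD_eq_getElem?_getD, List.getElem?_eq_none (by omega)]; decide
        rw [Bool.and_eq_false_iff]
        exact Or.inl (by simpa using hne)
  have hfirst : dFirst t 0 = none := by
    rcases dFirst_spec t t.length 0 0 (by omega) (by omega) (by simp)
        (fun j hj => absurd hj (by omega)) with ⟨h1, -⟩ | ⟨Q0, -, -, hQ, -, -⟩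
    · simpa using h1
    · rw [hqall Q0] at hQ
      exact absurd hQ (by simp)
  have hD2 : (t.isEmpty || PySem.Chars.isdigit (t.headD ' ')) = false := by
    rw [dFun, hfirst] at hD; exact hD
  simp only [Bool.or_eq_false_iff] at hD2
  obtain ⟨hne, hnd⟩ := hD2
  have hne' : t ≠ [] := by intro he; rw [he] at hne; simp at hne
  rw [find_no_paren hnp, stopA_no_paren t 21 count _ (by omega) hnp]
  rw [if_neg (by
    rintro (h | h)
    · have hl := congrArg List.length h
      rw [length_maskPre] at hl
      simp only [List.length_nil] at hl
      exact hne' (List.length_eq_zero_iff.mp hl)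
    · rw [headdig_maskPre] at h
      cases t with
      | nil => exact hne' rfl
      | cons c tl =>
        have h2 : PySem.Chars.isdigit c = true := by simpa [PySem.List.pyGetD_zero] using h
        simp [h2] at hnd)]
  rw [show PySem.List.enumerate (t.drop d) (d : Int) =
      PySem.List.enumerate (t.drop d) (d : Int) ++ [] from (List.append_nil _).symm]
  rw [altGo_skip t _ [] (by
    intro x hx
    rw [PySem.List.mem_enumerate_iff] at hx
    obtain ⟨k, hk, rfl⟩ := hx
    intro hc
    exact hall _ (List.getElem_mem hk) hc.1)]
  rfl

-- main invariant: A's loop from the d-masked string equals B's scan from position d, outside D_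
theorem main_inv (t : List Char) : ∀ (m d count : Nat), t.length - d ≤ m → d ≤ t.length →
    count = (t.take d).count '(' →
    (∀ i, i < d → qualB t i = false) →
    dFun t = false →
    stopA t (maskPre t d) (PySem.Chars.find (maskPre t d) ['(']) count =
      altGo t (PySem.List.enumerate (t.drop d) (d : Int)) := by
  intro m
  induction m with
  | zero =>
    intro d count hm hd hcount hq hD
    have hdrop : t.drop d = [] := List.drop_eq_nil_iff.mpr (by omega)
    exact main_nil t d count hd (by rw [hdrop]; intro c hc; simp at hc) hD hq
  | succ m ih =>
    intro d count hm hd hcount hq hD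
    rcases hw : (t.drop d).dropWhile (fun c => c != '(') with _ | ⟨c, rest⟩
    · -- no '(' at or after d
      apply main_nil t d count hd ?_ hD hq
      intro c hc hcp
      rw [← List.takeWhile_append_dropWhile (p := fun c => c != '(') (l := t.drop d), hw,
        List.append_nil] at hc
      have := List.mem_takeWhile_imp hc
      subst hcp
      simp at this
    · -- first '(' at or after d sits at position q = d + w.length
      have hc : c = '(' := by
        have h2 := List.head?_dropWhile_not (fun c => c != '(') (t.drop d)
        rw [hw] at h2
        simpa using h2
      subst hc
      set w := (t.drop d).takeWhile (fun c => c != '(') with hwdef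
      have hu : t.drop d = w ++ '(' :: rest := by
        conv_lhs => rw [← List.takeWhile_append_dropWhile (p := fun c => c != '(') (l := t.drop d)]
        rw [hw]
      have hwp : ∀ x ∈ w, x ≠ '(' := by
        intro x hx
        have := List.mem_takeWhile_imp hx
        simpa using this
      set q := d + w.length with hqdef
      have hlen : t.length - d = w.length + 1 + rest.length := by
        have := congrArg List.length hu
        simp at this
        omega
      have hqlen : q < t.length := by omega
      have hrest : t.drop (q + 1) = rest := by
        have h1 : t.drop (q + 1) = (t.drop d).drop (w.length + 1) := by
          rw [List.drop_drop, show d + (w.length + 1) = q + 1 from by omega]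
        rw [h1, hu, show w.length + 1 = w.length + 1 from rfl,
          ← List.drop_drop (i := 1) (j := w.length), List.drop_left,
          List.drop_one, List.tail_cons]
      -- the characters of t in [d, q) are not '(' and t[q] = '('
      have hmid : ∀ i, d ≤ i → i < q → t.getD i ' ' ≠ '(' := by
        intro i h1 h2
        have hlt : i - d < w.length := by omega
        have hgd : t[i]? = (w ++ '(' :: rest)[i - d]? := by
          rw [← hu, List.getElem?_drop]; congr 1; omega
        rw [List.getD_eq_getElem?_getD, hgd, List.getElem?_append_left hlt,
          List.getElem?_eq_getElem hlt]
        exact hwp _ (List.getElem_mem _)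
      have htq : t.getD q ' ' = '(' := by
        have hgd : t[q]? = (w ++ '(' :: rest)[w.length]? := by
          rw [← hu, List.getElem?_drop]
        rw [List.getD_eq_getElem?_getD, hgd, List.getElem?_append_right (le_refl _)]
        simp
      set pre := (t.take d).map mC ++ w with hpre
      have hsplit : maskPre t d = pre ++ '(' :: rest := by
        unfold maskPre
        rw [hu, hpre, List.append_assoc]
      have hpre_len : pre.length = q := by
        simp [hpre]
        omega
      have hpre_np : '(' ∉ pre := by
        intro hmem
        rcases List.mem_append.mp hmem with h | h
        · obtain ⟨x, -, hx⟩ := List.mem_map.mp h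
          exact mC_ne_paren x hx
        · exact hwp _ h rfl
      have hfind : PySem.Chars.find (maskPre t d) ['('] = (q : Int) := by
        rw [hsplit, find_at_paren _ _ hpre_np, hpre_len]
      have hgets : PySem.List.pyGetD (maskPre t d) ((q : Int) + 1) ' ' =
          PySem.List.pyGetD t ((q : Int) + 1) ' ' := by
        rw [show ((q : Int) + 1) = ((q + 1 : Nat) : Int) by push_cast; ring,
          PySem.List.pyGetD_natCast, PySem.List.pyGetD_natCast]
        exact getD_maskPre t hd (by omega)
      have hgett : PySem.List.pyGetD t ((q : Int) + 1) ' ' = t.getD (q + 1) ' ' := by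
        rw [show ((q : Int) + 1) = ((q + 1 : Nat) : Int) by push_cast; ring,
          PySem.List.pyGetD_natCast]
      -- decompose B's enumerate list and skip the paren-free segment
      have henum : PySem.List.enumerate (t.drop d) (d : Int) =
          PySem.List.enumerate w (d : Int) ++ ((q : Int), '(') :: PySem.List.enumerate rest ((q : Int) + 1) := by
        rw [hu, PySem.List.enumerate_append, PySem.List.enumerate_cons]
        congr 2
      have hskipw : ∀ x ∈ PySem.List.enumerate w (d : Int), ¬(x.2 = '(' ∧ ((x.1 + 1 = PySem.List.len t ∨
          PySem.Chars.isdigit (PySem.List.pyGetD t (x.1 + 1) ' ') = true))) := by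
        intro x hx
        rw [PySem.List.mem_enumerate_iff] at hx
        obtain ⟨k, hk, rfl⟩ := hx
        intro hcond
        exact hwp _ (List.getElem_mem hk) hcond.1
      rw [hfind, henum]
      by_cases hqual : q + 1 = t.length ∨ PySem.Chars.isdigit (t.getD (q + 1) ' ') = true
      · -- the '(' at q qualifies: both sides return q
        rw [stopA, if_neg (by
          rintro ⟨-, h2, h3⟩
          rw [length_maskPre'] at h2
          rcases hqual with hq1 | hq1
          · omega
          · rw [hgets, hgett] at h3; exact h3 hq1)]
        rw [altGo_skip t _ _ hskipw, altGo, if_pos ⟨rfl, by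
          rcases hqual with hq1 | hq1
          · left; rw [PySem.List.len_eq]; omega
          · right; rw [hgett]; exact hq1⟩]
      · -- the '(' at q does not qualify: A masks it, B moves past it
        push Not at hqual
        obtain ⟨hg1, hg2⟩ := hqual
        have hg1' : q + 1 < t.length := by omega
        -- count stays ≤ 20: the first qualifying index (if any) lies beyond q, and ¬D_ bounds its paren count
        have hcount' : count + 1 = (t.take (q + 1)).count '(' := by
          have htk : t.take (q + 1) = t.take q ++ [t[q]] := by
            rw [List.take_add_one, List.getElem?_eq_getElem hqlen]; rfl
          have htkq : t.take q = t.take d ++ w := by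
            have ht : t = (t.take d ++ w) ++ '(' :: rest := by
              conv_lhs => rw [← List.take_append_drop d t, hu]
              rw [List.append_assoc]
            have hlen2 : (t.take d ++ w).length = q := by
              simp; omega
            conv_lhs => rw [ht]
            rw [List.take_append, hlen2, Nat.sub_self, List.take_of_length_le (by omega)]
            simp
          have hwz : w.count '(' = 0 := by
            rw [List.count_eq_zero]; intro hm'; exact hwp _ hm' rfl
          have htq' : t[q] = '(' := by rw [← getD_lt hqlen]; exact htq
          rw [htk, htkq, List.count_append, List.count_append, hwz, htq']
          simp [hcount]
        -- the cap can only be hit when no index of t qualifies (otherwise ¬D_ bounds the count)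
        have hcapOr : (∀ i, qualB t i = false) ∨ ¬ (count + 1 > 20) := by
          rcases dFirst_spec t t.length 0 0 (by omega) (by omega) (by simp)
              (fun j hj => absurd hj (by omega)) with ⟨-, hnoq⟩ | ⟨Q0, -, hQl, hQ0, -, hfirst⟩
          · exact Or.inl hnoq
          · right
            have hfirst' : dFirst t 0 = some ((t.take Q0).count '(') := by simpa using hfirst
            have hD2 : decide (21 ≤ (t.take Q0).count '(') = false := by
              rw [dFun, hfirst'] at hD; exact hD
            rw [decide_eq_false_iff_not] at hD2
            have hQ0d : d ≤ Q0 := by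
              by_contra hlt
              rw [hq Q0 (by omega)] at hQ0
              exact absurd hQ0 (by simp)
            have hQ0q : q + 1 ≤ Q0 := by
              rcases Nat.lt_or_ge Q0 (q + 1) with hlt | hge
              · exfalso
                rcases Nat.lt_or_ge Q0 q with hlt2 | hge2
                · unfold qualB at hQ0
                  rcases Bool.and_eq_true_iff.mp hQ0 with ⟨h1, -⟩
                  exact hmid Q0 hQ0d hlt2 (beq_iff_eq.mp h1)
                · have : Q0 = q := by omega
                  subst this
                  unfold qualB at hQ0
                  rcases Bool.and_eq_true_iff.mp hQ0 with ⟨-, h2⟩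
                  rcases Bool.or_eq_true_iff.mp h2 with h3 | h3
                  · rw [decide_eq_true_iff] at h3; omega
                  · exact hg2 h3
              · exact hge
            have := count_take_mono t hQ0q
            omega
        rw [stopA, if_pos ⟨by rw [length_maskPre']; exact_mod_cast hqlen,
            by rw [length_maskPre']; omega,
            by rw [hgets, hgett]; exact hg2⟩]
        by_cases hcap : count + 1 > 20
        · -- cap hit: A returns len t; B scans past every (non-qualifying) entry to len t
          have hnoq : ∀ i, qualB t i = false := by
            rcases hcapOr with h | h
            · exact h
            · omega
          rw [dif_pos hcap, ← henum,
            show PySem.List.enumerate (t.drop d) (d : Int) =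
              PySem.List.enumerate (t.drop d) (d : Int) ++ [] from (List.append_nil _).symm,
            altGo_skip t _ [] (noqual_entries t d hnoq)]
          rfl
        · rw [dif_neg hcap]
          -- masking position q of the d-masked string gives the (q+1)-masked string
          have hmapw : w.map mC = w := by
            rw [List.map_congr_left (fun x hx => mC_eq_self (hwp x hx))]
            exact List.map_id w
          have htake : t.take (q + 1) = (t.take d ++ w) ++ ['('] := by
            have ht : t = (t.take d ++ w) ++ '(' :: rest := by
              conv_lhs => rw [← List.take_append_drop d t, hu]
              rw [List.append_assoc]
            have hlen2 : (t.take d ++ w).length = q := by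
              simp
              omega
            conv_lhs => rw [ht]
            rw [List.take_append, hlen2, show q + 1 - q = 1 from by omega,
              List.take_of_length_le (by rw [hlen2]; omega)]
            simp
          have hmask : maskA (maskPre t d) ((q : Int)) = maskPre t (q + 1) := by
            rw [maskA, PySem.List.pySetD_natCast, hsplit]
            have hset : (pre ++ '(' :: rest).set q '_' = pre ++ '_' :: rest := by
              rw [← hpre_len, List.set_append, if_neg (by omega)]
              simp
            rw [hset]
            unfold maskPre
            rw [htake, hrest]
            simp only [List.map_append, List.map_cons, List.map_nil, hmapw]
            rw [hpre]
            simp [mC, List.append_assoc]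
          have hq' : ∀ i, i < q + 1 → qualB t i = false := by
            intro i hi
            by_cases h1 : i < d
            · exact hq i h1
            · by_cases h2 : i < q
              · have hne := hmid i (by omega) h2
                unfold qualB
                rw [Bool.and_eq_false_iff]
                exact Or.inl (by simpa using hne)
              · have : i = q := by omega
                subst this
                unfold qualB
                rw [htq]
                simp only [beq_self_eq_true, Bool.true_and, Bool.or_eq_false_iff,
                  decide_eq_false_iff_not]
                exact ⟨by omega, Bool.eq_false_iff.mpr hg2⟩
          have hrec := ih (q + 1) (count + 1) (by omega) (by omega) hcount' hq' hD
          rw [hmask, hrec, hrest]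
          -- B: skip the paren-free entries and the non-qualifying '(' at q
          rw [show PySem.List.enumerate w (d : Int) ++ ((q : Int), '(') :: PySem.List.enumerate rest ((q : Int) + 1) =
              (PySem.List.enumerate w (d : Int) ++ [((q : Int), '(')]) ++ PySem.List.enumerate rest ((q : Int) + 1) from by
            simp]
          rw [altGo_skip t _ _ (by
            intro x hx
            rcases List.mem_append.mp hx with h | h
            · exact hskipw x h
            · simp only [List.mem_singleton] at h
              subst h
              rintro ⟨-, h2⟩
              rcases h2 with h3 | h3
              · rw [PySem.List.len_eq] at h3
                omega
              · rw [hgett] at h3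
                exact hg2 h3)]
          congr 1

-- ===== VERDICT =====
theorem st_op_spec : Claim_unchanged_st_op := by
  intro t _ hD
  unfold st_op st_op_alt
  have hD' : dFun t.toList = false := by
    unfold D_st_op at hD
    exact Bool.not_eq_true _ ▸ (by simpa using hD)
  have := main_inv t.toList t.toList.length 0 0 (by omega) (by omega) (by simp)
    (by intro i hi; omega) hD'
  simpa [maskPre] using this

theorem st_op_changed : Claim_changed_st_op := by
  unfold Claim_changed_st_op
  refine ⟨by decide, by decide, ?_, by decide, by decide⟩
  show st_op "1" = -1
  unfold st_op
  show stopA "1".toList "1".toList (PySem.Chars.find "1".toList ['(']) 0 = -1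
  rw [show "1".toList = ['1'] from rfl, find_no_paren (by decide), stopA, if_neg (by decide)]
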